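-- pv_equiv track=rewrite | github.com/markhiner/Hiner.nyc | yocto/hotel_search_web.py | amenity_svgs
-- ===== SOURCE A (Python) =====
-- from typing import Any, Dict, List, Tuple, Optional
--
-- AMENITY_ICONS: Dict[str, Tuple[str, str]] = {
--     "pool": ('Pool', """
-- <svg viewBox="0 0 24 24" class="amenity" aria-hidden="true">
--   <path d="M2 17c2 0 2-1 4-1s2 1 4 1 2-1 4-1 2 1 4 1 2-1 4-1v2c-2 0-2 1-4 1s-2-1-4-1-2 1-4 1-2-1-4-1v-2zM8 6a3 3 0 016 0v5h-2V6a1 1 0 10-2 0v5H8V6z"/>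
-- </svg>
-- """),
--     "hot tub": ('Hot tub', """
-- <svg viewBox="0 0 24 24" class="amenity" aria-hidden="true">
--   <path d="M3 10h18v6a3 3 0 01-3 3H6a3 3 0 01-3-3v-6zm4-3c0-1.1.9-2 2-2s2 .9 2 2v1H7V7zM15 7c0-1.1.9-2 2-2s2 .9 2 2v1h-4V7z"/>
-- </svg>
-- """),
--     "pet": ('Pet friendly', """
-- <svg viewBox="0 0 24 24" class="amenity" aria-hidden="true">
--   <path d="M12 13c-2.8 0-8 1.4-8 4.2S9.2 20 12 20s8-.6 8-2.8S14.8 13 12 13zM6.5 9A1.5 2 0 108 9a1.5 2 0 00-1.5-2zM10.5 7A1.5 2 0 1012 7a1.5 2 0 00-1.5-2zM13.5 7A1.5 2 0 1015 7a1.5 2 0 00-1.5-2zM17.5 9A1.5 2 0 1019 9a1.5 2 0 00-1.5-2z"/>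
-- </svg>
-- """),
--     "spa": ('Spa', """
-- <svg viewBox="0 0 24 24" class="amenity" aria-hidden="true">
--   <path d="M12 3C9 6 8 9 8 12s1 6 4 9c3-3 4-6 4-9s-1-6-4-9zm0 6a3 3 0 110 6 3 3 0 010-6z"/>
-- </svg>
-- """),
--     "restaurant": ('Restaurant', """
-- <svg viewBox="0 0 24 24" class="amenity" aria-hidden="true">
--   <path d="M7 2h2v10a2 2 0 11-4 0V2h2zm8 0h2v7h2v13h-2V11h-2V2z"/>
-- </svg>
-- """),
--     "room service": ('Room service', """
-- <svg viewBox="0 0 24 24" class="amenity" aria-hidden="true">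
--   <path d="M12 5a7 7 0 00-7 7h14a7 7 0 00-7-7zm-9 9v2h18v-2H3z"/>
-- </svg>
-- """),
--     "beach": ('Beach access', """
-- <svg viewBox="0 0 24 24" class="amenity" aria-hidden="true">
--   <path d="M2 18c2 0 2-1 4-1s2 1 4 1 2-1 4-1 2 1 4 1 2-1 4-1v2c-2 0-2 1-4 1s-2-1-4-1-2 1-4 1-2-1-4-1v-2zM12 4l3 5H9l3-5z"/>
-- </svg>
-- """),
--     "bar": ('Bar', """
-- <svg viewBox="0 0 24 24" class="amenity" aria-hidden="true">
--   <path d="M3 3h18l-6 8v7h-6v-7L3 3z"/>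
-- </svg>
-- """),
-- }
--
-- def amenity_svgs(amenities: Any) -> str:
--     if not isinstance(amenities, list):
--         return ""
--     text = [str(a).lower() for a in amenities]
--     chosen: List[str] = []
--
--     def add(key: str):
--         label, svg = AMENITY_ICONS.get(key, (None, None))  # type: ignore
--         if svg:
--             chosen.append(f"<span class='amenity-wrap' title='{label}'>{svg}</span>")
--
--     if any("pool" in a for a in text): add("pool")
--     if any(("hot tub" in a) or ("whirlpool" in a) or ("jacuzzi" in a) for a in text): add("hot tub")
--     if any("pet" in a for a in text): add("pet")
--     if any("spa" in a for a in text): add("spa")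
--     if any(("restaurant" in a) or ("dining" in a) for a in text): add("restaurant")
--     if any("room service" in a for a in text): add("room service")
--     if any("beach" in a for a in text): add("beach")
--     if any(("bar" in a) or ("lounge" in a) for a in text): add("bar")
--     return "".join(chosen)
-- ===== SOURCE B (Python) =====
-- from typing import Any, Dict, List, Tuple, Optional
--
-- AMENITY_ICONS: Dict[str, Tuple[str, str]] = {
--     "pool": ('Pool', """
-- <svg viewBox="0 0 24 24" class="amenity" aria-hidden="true">
--   <path d="M2 17c2 0 2-1 4-1s2 1 4 1 2-1 4-1 2 1 4 1 2-1 4-1v2c-2 0-2 1-4 1s-2-1-4-1-2 1-4 1-2-1-4-1v-2zM8 6a3 3 0 016 0v5h-2V6a1 1 0 10-2 0v5H8V6z"/>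
-- </svg>
-- """),
--     "hot tub": ('Hot tub', """
-- <svg viewBox="0 0 24 24" class="amenity" aria-hidden="true">
--   <path d="M3 10h18v6a3 3 0 01-3 3H6a3 3 0 01-3-3v-6zm4-3c0-1.1.9-2 2-2s2 .9 2 2v1H7V7zM15 7c0-1.1.9-2 2-2s2 .9 2 2v1h-4V7z"/>
-- </svg>
-- """),
--     "pet": ('Pet friendly', """
-- <svg viewBox="0 0 24 24" class="amenity" aria-hidden="true">
--   <path d="M12 13c-2.8 0-8 1.4-8 4.2S9.2 20 12 20s8-.6 8-2.8S14.8 13 12 13zM6.5 9A1.5 2 0 108 9a1.5 2 0 00-1.5-2zM10.5 7A1.5 2 0 1012 7a1.5 2 0 00-1.5-2zM13.5 7A1.5 2 0 1015 7a1.5 2 0 00-1.5-2zM17.5 9A1.5 2 0 1019 9a1.5 2 0 00-1.5-2z"/>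
-- </svg>
-- """),
--     "spa": ('Spa', """
-- <svg viewBox="0 0 24 24" class="amenity" aria-hidden="true">
--   <path d="M12 3C9 6 8 9 8 12s1 6 4 9c3-3 4-6 4-9s-1-6-4-9zm0 6a3 3 0 110 6 3 3 0 010-6z"/>
-- </svg>
-- """),
--     "restaurant": ('Restaurant', """
-- <svg viewBox="0 0 24 24" class="amenity" aria-hidden="true">
--   <path d="M7 2h2v10a2 2 0 11-4 0V2h2zm8 0h2v7h2v13h-2V11h-2V2z"/>
-- </svg>
-- """),
--     "room service": ('Room service', """
-- <svg viewBox="0 0 24 24" class="amenity" aria-hidden="true">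
--   <path d="M12 5a7 7 0 00-7 7h14a7 7 0 00-7-7zm-9 9v2h18v-2H3z"/>
-- </svg>
-- """),
--     "beach": ('Beach access', """
-- <svg viewBox="0 0 24 24" class="amenity" aria-hidden="true">
--   <path d="M2 18c2 0 2-1 4-1s2 1 4 1 2-1 4-1 2 1 4 1 2-1 4-1v2c-2 0-2 1-4 1s-2-1-4-1-2 1-4 1-2-1-4-1v-2zM12 4l3 5H9l3-5z"/>
-- </svg>
-- """),
--     "bar": ('Bar', """
-- <svg viewBox="0 0 24 24" class="amenity" aria-hidden="true">
--   <path d="M3 3h18l-6 8v7h-6v-7L3 3z"/>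
-- </svg>
-- """),
-- }
--
-- # keyword table in the fixed emission order: (icon key, trigger substrings)
-- _TRIGGERS: List[Tuple[str, List[str]]] = [
--     ("pool", ["pool"]),
--     ("hot tub", ["hot tub", "whirlpool", "jacuzzi"]),
--     ("pet", ["pet"]),
--     ("spa", ["spa"]),
--     ("restaurant", ["restaurant", "dining"]),
--     ("room service", ["room service"]),
--     ("beach", ["beach"]),
--     ("bar", ["bar", "lounge"]),
-- ]
--
-- def amenity_svgs(amenities: Any) -> str:
--     if not isinstance(amenities, list):
--         return ""
--     matched = set()
--     for a in amenities:
--         low = str(a).lower()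
--         for key, trigs in _TRIGGERS:
--             if any(t in low for t in trigs):
--                 matched.add(key)
--     return "".join(
--         f"<span class='amenity-wrap' title='{label}'>{svg}</span>"
--         for key, (label, svg) in AMENITY_ICONS.items()
--         if key in matched
--     )
-- ===== Notes on version B (the rewrite author's own statement) =====
-- stated objective: idiomatic
-- what changed: Replaced A's eight independent any(...) scans over the amenity list (one per icon) with a data-driven keyword table: one pass over the amenities collects matched icon keys into a set, then a second pass over the table emits the spans in the fixed table order.
import Mathlib
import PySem

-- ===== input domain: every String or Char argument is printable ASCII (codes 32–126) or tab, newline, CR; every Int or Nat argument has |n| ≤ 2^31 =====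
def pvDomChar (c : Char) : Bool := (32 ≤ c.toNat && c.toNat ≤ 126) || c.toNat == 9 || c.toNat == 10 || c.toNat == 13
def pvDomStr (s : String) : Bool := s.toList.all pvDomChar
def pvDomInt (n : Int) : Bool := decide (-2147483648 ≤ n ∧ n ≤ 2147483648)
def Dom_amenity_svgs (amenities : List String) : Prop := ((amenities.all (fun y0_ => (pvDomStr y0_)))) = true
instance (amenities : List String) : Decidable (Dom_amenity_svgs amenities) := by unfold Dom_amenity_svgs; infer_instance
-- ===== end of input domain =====

-- B replaces A's eight independent `any` scans over the amenity list by a keyword table and one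
-- pass that collects matched icon keys into a set, then emits the spans in the table's fixed order
-- (objective: idiomatic/alternative; same output, same asymptotic cost).

def pvSvg_pool : String := "\n<svg viewBox=\"0 0 24 24\" class=\"amenity\" aria-hidden=\"true\">\n  <path d=\"M2 17c2 0 2-1 4-1s2 1 4 1 2-1 4-1 2 1 4 1 2-1 4-1v2c-2 0-2 1-4 1s-2-1-4-1-2 1-4 1-2-1-4-1v-2zM8 6a3 3 0 016 0v5h-2V6a1 1 0 10-2 0v5H8V6z\"/>\n</svg>\n"

def pvSvg_hotTub : String := "\n<svg viewBox=\"0 0 24 24\" class=\"amenity\" aria-hidden=\"true\">\n  <path d=\"M3 10h18v6a3 3 0 01-3 3H6a3 3 0 01-3-3v-6zm4-3c0-1.1.9-2 2-2s2 .9 2 2v1H7V7zM15 7c0-1.1.9-2 2-2s2 .9 2 2v1h-4V7z\"/>\n</svg>\n"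

def pvSvg_pet : String := "\n<svg viewBox=\"0 0 24 24\" class=\"amenity\" aria-hidden=\"true\">\n  <path d=\"M12 13c-2.8 0-8 1.4-8 4.2S9.2 20 12 20s8-.6 8-2.8S14.8 13 12 13zM6.5 9A1.5 2 0 108 9a1.5 2 0 00-1.5-2zM10.5 7A1.5 2 0 1012 7a1.5 2 0 00-1.5-2zM13.5 7A1.5 2 0 1015 7a1.5 2 0 00-1.5-2zM17.5 9A1.5 2 0 1019 9a1.5 2 0 00-1.5-2z\"/>\n</svg>\n"

def pvSvg_spa : String := "\n<svg viewBox=\"0 0 24 24\" class=\"amenity\" aria-hidden=\"true\">\n  <path d=\"M12 3C9 6 8 9 8 12s1 6 4 9c3-3 4-6 4-9s-1-6-4-9zm0 6a3 3 0 110 6 3 3 0 010-6z\"/>\n</svg>\n"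

def pvSvg_restaurant : String := "\n<svg viewBox=\"0 0 24 24\" class=\"amenity\" aria-hidden=\"true\">\n  <path d=\"M7 2h2v10a2 2 0 11-4 0V2h2zm8 0h2v7h2v13h-2V11h-2V2z\"/>\n</svg>\n"

def pvSvg_roomService : String := "\n<svg viewBox=\"0 0 24 24\" class=\"amenity\" aria-hidden=\"true\">\n  <path d=\"M12 5a7 7 0 00-7 7h14a7 7 0 00-7-7zm-9 9v2h18v-2H3z\"/>\n</svg>\n"

def pvSvg_beach : String := "\n<svg viewBox=\"0 0 24 24\" class=\"amenity\" aria-hidden=\"true\">\n  <path d=\"M2 18c2 0 2-1 4-1s2 1 4 1 2-1 4-1 2 1 4 1 2-1 4-1v2c-2 0-2 1-4 1s-2-1-4-1-2 1-4 1-2-1-4-1v-2zM12 4l3 5H9l3-5z\"/>\n</svg>\n"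

def pvSvg_bar : String := "\n<svg viewBox=\"0 0 24 24\" class=\"amenity\" aria-hidden=\"true\">\n  <path d=\"M3 3h18l-6 8v7h-6v-7L3 3z\"/>\n</svg>\n"

def pvIcons : PySem.Dict String (String × String) := PySem.Dict.mk
  [("pool", ("Pool", pvSvg_pool)),
   ("hot tub", ("Hot tub", pvSvg_hotTub)),
   ("pet", ("Pet friendly", pvSvg_pet)),
   ("spa", ("Spa", pvSvg_spa)),
   ("restaurant", ("Restaurant", pvSvg_restaurant)),
   ("room service", ("Room service", pvSvg_roomService)),
   ("beach", ("Beach access", pvSvg_beach)),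
   ("bar", ("Bar", pvSvg_bar))]

-- ===== PORT A =====
def pvAdd (chosen : List String) (key : String) : List String :=
  match PySem.Dict.get? pvIcons key with
  | some (label, svg) =>
      if svg == "" then chosen
      else chosen ++ ["<span class='amenity-wrap' title='" ++ label ++ "'>" ++ svg ++ "</span>"]
  | none => chosen

def amenity_svgs (amenities : List String) : String :=
  let text := amenities.map PySem.Str.lower
  let chosen : List String := []
  let chosen := if text.any (fun a => PySem.Str.isIn "pool" a) then pvAdd chosen "pool" else chosen
  let chosen := if text.any (fun a => PySem.Str.isIn "hot tub" a || PySem.Str.isIn "whirlpool" a || PySem.Str.isIn "jacuzzi" a) then pvAdd chosen "hot tub" else chosen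
  let chosen := if text.any (fun a => PySem.Str.isIn "pet" a) then pvAdd chosen "pet" else chosen
  let chosen := if text.any (fun a => PySem.Str.isIn "spa" a) then pvAdd chosen "spa" else chosen
  let chosen := if text.any (fun a => PySem.Str.isIn "restaurant" a || PySem.Str.isIn "dining" a) then pvAdd chosen "restaurant" else chosen
  let chosen := if text.any (fun a => PySem.Str.isIn "room service" a) then pvAdd chosen "room service" else chosen
  let chosen := if text.any (fun a => PySem.Str.isIn "beach" a) then pvAdd chosen "beach" else chosen
  let chosen := if text.any (fun a => PySem.Str.isIn "bar" a || PySem.Str.isIn "lounge" a) then pvAdd chosen "bar" else chosen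
  PySem.Str.join "" chosen

-- ===== PORT B =====
def pvTriggers : List (String × List String) :=
  [("pool", ["pool"]),
   ("hot tub", ["hot tub", "whirlpool", "jacuzzi"]),
   ("pet", ["pet"]),
   ("spa", ["spa"]),
   ("restaurant", ["restaurant", "dining"]),
   ("room service", ["room service"]),
   ("beach", ["beach"]),
   ("bar", ["bar", "lounge"])]

def pvMatched (amenities : List String) : PySem.Set String :=
  amenities.foldl (fun m a =>
    let low := PySem.Str.lower a
    pvTriggers.foldl (fun m' kt =>
      if kt.2.any (fun t => PySem.Str.isIn t low) then PySem.Set.add m' kt.1 else m') m)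
    PySem.Set.empty

def amenity_svgs_alt (amenities : List String) : String :=
  let matched := pvMatched amenities
  PySem.Str.join ""
    ((pvIcons.items.filter (fun e => PySem.Set.contains matched e.1)).map
      (fun e => "<span class='amenity-wrap' title='" ++ e.2.1 ++ "'>" ++ e.2.2 ++ "</span>"))

-- ===== PRECONDITION & SPEC =====
def Spec_amenity_svgs (amenities : List String) (out : String) : Prop := out = amenity_svgs_alt amenities
instance (amenities : List String) (out : String) : Decidable (Spec_amenity_svgs amenities out) := by unfold Spec_amenity_svgs; infer_instance

-- ===== CLAIM (what is proved, stated in full; the proofs are below) =====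
def Claim_equal_amenity_svgs : Prop := ∀ (amenities : List String), Dom_amenity_svgs amenities → Spec_amenity_svgs amenities (amenity_svgs amenities)

-- ===== LEMMAS AND PROOFS =====

lemma pv_contains_add (s : PySem.Set String) (y x : String) :
    PySem.Set.contains (PySem.Set.add s y) x = (PySem.Set.contains s x || x == y) := by
  rw [Bool.eq_iff_iff]
  simp [PySem.Set.mem_add]

lemma pv_contains_table (tbl : List (String × List String)) (low : String)
    (m : PySem.Set String) (x : String) :
    PySem.Set.contains
      (tbl.foldl (fun m' kt =>
        if kt.2.any (fun t => PySem.Str.isIn t low) then PySem.Set.add m' kt.1 else m') m) x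
    = (PySem.Set.contains m x
        || tbl.any (fun kt => x == kt.1 && kt.2.any (fun t => PySem.Str.isIn t low))) := by
  induction tbl generalizing m with
  | nil => simp
  | cons kt t ih =>
    cases hc : kt.2.any (fun t => PySem.Str.isIn t low) with
    | true =>
      simp only [List.foldl_cons, List.any_cons, hc, if_true, ih, pv_contains_add, Bool.and_true]
      cases PySem.Set.contains m x <;> cases (x == kt.1) <;> simp
    | false =>
      simp only [List.foldl_cons, List.any_cons, hc, Bool.false_eq_true, if_false, ih,
        Bool.and_false, Bool.false_or]

lemma pv_contains_matched (amenities : List String) (x : String) :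
    PySem.Set.contains (pvMatched amenities) x
    = amenities.any (fun a =>
        pvTriggers.any (fun kt => x == kt.1 && kt.2.any (fun t => PySem.Str.isIn t (PySem.Str.lower a)))) := by
  unfold pvMatched
  suffices h : ∀ m, PySem.Set.contains
      (amenities.foldl (fun m a =>
        pvTriggers.foldl (fun m' kt =>
          if kt.2.any (fun t => PySem.Str.isIn t (PySem.Str.lower a)) then PySem.Set.add m' kt.1 else m') m) m) x
      = (PySem.Set.contains m x || amenities.any (fun a =>
          pvTriggers.any (fun kt => x == kt.1 && kt.2.any (fun t => PySem.Str.isIn t (PySem.Str.lower a))))) by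
    simpa [PySem.Set.empty] using h PySem.Set.empty
  induction amenities with
  | nil => simp
  | cons a t ih =>
    intro m
    simp only [List.foldl_cons, List.any_cons, ih, pv_contains_table, Bool.or_assoc]

lemma pv_ite_append (c : Prop) [Decidable c] (x : List String) (s : String) :
    (if c then x ++ [s] else x) = x ++ (if c then [s] else []) := by
  split <;> simp

lemma pv_fm {α β : Type} (p : α → Bool) (f : α → β) (e : α) (t : List α) :
    ((e :: t).filter p).map f = (if p e = true then [f e] else []) ++ (t.filter p).map f := by
  by_cases h : p e = true <;> simp [h]

-- ===== VERDICT (by name: the statement is the Claim_ definition above) =====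
set_option maxRecDepth 8192 in
theorem amenity_svgs_spec : Claim_equal_amenity_svgs := by
  intro amenities _
  show amenity_svgs amenities = amenity_svgs_alt amenities
  unfold amenity_svgs amenity_svgs_alt
  simp only [pvIcons]
  simp only [pv_fm, List.filter_nil, List.map_nil, List.append_nil]
  simp only [pv_contains_matched, pvTriggers]
  simp [pvAdd, pvIcons, PySem.Dict.get?_mk_cons, List.any_map, Function.comp, or_assoc,
    pvSvg_pool, pvSvg_hotTub, pvSvg_pet, pvSvg_spa, pvSvg_restaurant,
    pvSvg_roomService, pvSvg_beach, pvSvg_bar]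
  simp only [pv_ite_append]
  simp [List.append_assoc]
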